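-- pv_equiv track=rewrite | github.com/anniebryan/advent-of-code-19 | 2021/day17/solution.py | max_y_pos_hits_target
-- ===== SOURCE A (Python) =====
-- def x_in_range(x_pos, target_area):
--     x_range = target_area[0]
--     x_min, x_max = x_range
--     if x_pos < x_min: return -1  # too far left
--     if x_pos > x_max: return 1  # too far right
--     return 0  # within the range
--
-- def y_in_range(y_pos, target_area):
--     y_range = target_area[1]
--     y_min, y_max = y_range
--     if y_pos < y_min: return -1 # too high
--     if y_pos > y_max: return 1 # too low
--     return 0 # within the range
--
-- def in_target_area(x_pos, y_pos, target_area):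
--     return x_in_range(x_pos, target_area) == 0 and y_in_range(y_pos, target_area) == 0
--
-- def step(x_pos, y_pos, x_vel, y_vel):
--     new_x_pos = x_pos + x_vel
--     new_y_pos = y_pos + y_vel
--     new_x_vel = x_vel - 1 if x_vel > 0 else x_vel + 1 if x_vel < 0 else 0
--     new_y_vel = y_vel - 1
--     return (new_x_pos, new_y_pos, new_x_vel, new_y_vel)
--
-- def hits_target_area(x_vel, y_vel, target_area):
--     x_pos, y_pos = (0, 0)
--     while not in_target_area(x_pos, y_pos, target_area):
--         x_pos, y_pos, x_vel, y_vel = step(x_pos, y_pos, x_vel, y_vel)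
--         if y_in_range(y_pos, target_area) == -1: return False
--         if x_in_range(x_pos, target_area) == 1: return False
--     return True
--
-- def max_y_pos(x_vel, y_vel):
--     x_pos, y_pos = (0, 0)
--     max_y = y_pos
--     while y_vel > 0:
--         x_pos, y_pos, x_vel, y_vel = step(x_pos, y_pos, x_vel, y_vel)
--         max_y = max(max_y, y_pos)
--     return max_y
--
-- def max_y_pos_hits_target(target_area):
--     max_y = 0
--     best_x_vel, best_y_vel = (None, None)
--     for x_vel in range(1, 241):
--         for y_vel in range(1, 500):
--             if hits_target_area(x_vel, y_vel, target_area):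
--                 new_max = max_y_pos(x_vel, y_vel)
--                 if new_max > max_y:
--                     max_y = new_max
--                     best_x_vel, best_y_vel = (x_vel, y_vel)
--     return max_y, best_x_vel, best_y_vel
-- ===== SOURCE B (Python) =====
-- def _peak(v):
--     return v * (v + 1) // 2
--
-- def _hits(xv, yv, x_min, x_max, y_min, y_max):
--     if x_min <= 0 <= x_max and y_min <= 0 <= y_max:
--         return True
--     if yv < y_min:
--         return False
--     t = 1
--     while True:
--         y = t * yv - t * (t - 1) // 2
--         if y < y_min and t > yv:
--             return False
--         x = t * xv - t * (t - 1) // 2 if t <= xv else _peak(xv)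
--         if x_min <= x <= x_max and y_min <= y <= y_max:
--             return True
--         if x > x_max:
--             return False
--         t += 1
--
-- def max_y_pos_hits_target(target_area):
--     (x_min, x_max), (y_min, y_max) = target_area
--     for y_vel in range(499, 0, -1):
--         for x_vel in range(1, 241):
--             if _hits(x_vel, y_vel, x_min, x_max, y_min, y_max):
--                 return (_peak(y_vel), x_vel, y_vel)
--     return (0, None, None)
-- ===== Notes on version B (the rewrite author's own statement) =====
-- stated objective: faster
-- what changed: B replaces A's exhaustive 240x499 scan (each pair fully simulated step by step, plus a second simulation to find the peak) by a descending-y-velocity search that returns at the first hit, computing positions in closed form (x(t)=t*xv-t(t-1)/2 capped, y(t)=t*yv-t(t-1)/2) and the peak height as yv*(yv+1)/2 instead of simulating it.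
import Mathlib
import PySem

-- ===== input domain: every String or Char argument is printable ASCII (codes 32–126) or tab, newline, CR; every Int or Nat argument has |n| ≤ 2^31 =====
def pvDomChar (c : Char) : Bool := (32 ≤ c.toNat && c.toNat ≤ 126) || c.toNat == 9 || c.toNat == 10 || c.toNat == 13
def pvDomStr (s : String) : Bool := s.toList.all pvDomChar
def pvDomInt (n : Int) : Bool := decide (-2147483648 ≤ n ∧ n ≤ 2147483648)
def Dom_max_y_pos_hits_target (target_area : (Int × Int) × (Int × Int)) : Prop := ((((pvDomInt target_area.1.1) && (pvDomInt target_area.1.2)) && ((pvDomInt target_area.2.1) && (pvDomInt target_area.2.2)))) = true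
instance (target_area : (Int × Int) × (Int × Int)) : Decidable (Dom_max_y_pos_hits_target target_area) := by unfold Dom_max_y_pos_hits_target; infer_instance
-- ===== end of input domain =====

-- B replaces A's full 240×499 scan with simulated trajectories by a descending-y_vel
-- search that returns at the first hit, using closed-form positions and the closed-form
-- peak height y_vel*(y_vel+1)/2 (objective: faster first-hit search, same exact result).

-- ===== PORT A =====
def x_in_range (x_pos : Int) (target_area : (Int × Int) × (Int × Int)) : Int :=
  if x_pos < target_area.1.1 then -1
  else if x_pos > target_area.1.2 then 1
  else 0

def y_in_range (y_pos : Int) (target_area : (Int × Int) × (Int × Int)) : Int :=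
  if y_pos < target_area.2.1 then -1
  else if y_pos > target_area.2.2 then 1
  else 0

def in_target_area (x_pos y_pos : Int) (target_area : (Int × Int) × (Int × Int)) : Bool :=
  x_in_range x_pos target_area == 0 && y_in_range y_pos target_area == 0

def step (x_pos y_pos x_vel y_vel : Int) : Int × Int × Int × Int :=
  (x_pos + x_vel, y_pos + y_vel,
   (if x_vel > 0 then x_vel - 1 else if x_vel < 0 then x_vel + 1 else 0),
   y_vel - 1)

-- the while loop of hits_target_area; fuel only bounds the number of iterations
def hits_loop (target_area : (Int × Int) × (Int × Int)) :
    Nat → Int → Int → Int → Int → Bool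
  | f, x_pos, y_pos, x_vel, y_vel =>
    if in_target_area x_pos y_pos target_area then true
    else
      let s := step x_pos y_pos x_vel y_vel
      if y_in_range s.2.1 target_area == -1 then false
      else if x_in_range s.1 target_area == 1 then false
      else
        match f with
        | 0 => false
        | f' + 1 => hits_loop target_area f' s.1 s.2.1 s.2.2.1 s.2.2.2

-- fuel 2*|y_vel| + |y_min| + 4 exceeds the first step at which the loop must exit
def hits_target_area (x_vel y_vel : Int) (target_area : (Int × Int) × (Int × Int)) : Bool :=
  hits_loop target_area (2 * y_vel.natAbs + target_area.2.1.natAbs + 4) 0 0 x_vel y_vel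

-- the while loop of max_y_pos; it runs exactly max(y_vel,0) iterations, fuel |y_vel| suffices
def max_y_loop : Nat → Int → Int → Int → Int → Int → Int
  | f, x_pos, y_pos, x_vel, y_vel, max_y =>
    if y_vel > 0 then
      match f with
      | 0 => max_y
      | f' + 1 =>
        let s := step x_pos y_pos x_vel y_vel
        max_y_loop f' s.1 s.2.1 s.2.2.1 s.2.2.2 (max max_y s.2.1)
    else max_y

def max_y_pos (x_vel y_vel : Int) : Int :=
  max_y_loop y_vel.natAbs 0 0 x_vel y_vel 0

def max_y_pos_hits_target (target_area : (Int × Int) × (Int × Int)) :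
    Int × Option Int × Option Int :=
  (PySem.List.pyRange 1 241 1).foldl (fun st x_vel =>
    (PySem.List.pyRange 1 500 1).foldl (fun st y_vel =>
      if hits_target_area x_vel y_vel target_area then
        let new_max := max_y_pos x_vel y_vel
        if new_max > st.1 then (new_max, some x_vel, some y_vel) else st
      else st) st) (0, none, none)

-- ===== PORT B =====
def peakB (v : Int) : Int := PySem.Int.floordiv (v * (v + 1)) 2

-- B's while True loop over the step index t (closed-form positions); fuel bounds iterations
def hitsB_loop (xv yv x_min x_max y_min y_max : Int) : Nat → Int → Bool
  | f, t =>
    let y := t * yv - PySem.Int.floordiv (t * (t - 1)) 2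
    if y < y_min ∧ t > yv then false
    else
      let x := if t ≤ xv then t * xv - PySem.Int.floordiv (t * (t - 1)) 2 else peakB xv
      if x_min ≤ x ∧ x ≤ x_max ∧ y_min ≤ y ∧ y ≤ y_max then true
      else if x > x_max then false
      else
        match f with
        | 0 => false
        | f' + 1 => hitsB_loop xv yv x_min x_max y_min y_max f' (t + 1)

def hitsB (xv yv x_min x_max y_min y_max : Int) : Bool :=
  if x_min ≤ 0 ∧ 0 ≤ x_max ∧ y_min ≤ 0 ∧ 0 ≤ y_max then true
  else if yv < y_min then false
  else hitsB_loop xv yv x_min x_max y_min y_max (2 * yv.natAbs + y_min.natAbs + 3) 1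

-- the outer for y_vel loop with its early return; the inner for x_vel loop is a first-match search
def searchB (x_min x_max y_min y_max : Int) : List Int → Int × Option Int × Option Int
  | [] => (0, none, none)
  | yv :: rest =>
    match (PySem.List.pyRange 1 241 1).find? (fun xv => hitsB xv yv x_min x_max y_min y_max) with
    | some xv => (peakB yv, some xv, some yv)
    | none => searchB x_min x_max y_min y_max rest

def max_y_pos_hits_target_alt (target_area : (Int × Int) × (Int × Int)) :
    Int × Option Int × Option Int :=
  searchB target_area.1.1 target_area.1.2 target_area.2.1 target_area.2.2
    (PySem.List.pyRange 499 0 (-1))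

-- ===== PRECONDITION & SPEC =====
def Spec_max_y_pos_hits_target (target_area : (Int × Int) × (Int × Int)) (out : Int × Option Int × Option Int) : Prop := out = max_y_pos_hits_target_alt target_area
instance (target_area : (Int × Int) × (Int × Int)) (out : Int × Option Int × Option Int) : Decidable (Spec_max_y_pos_hits_target target_area out) := by unfold Spec_max_y_pos_hits_target; infer_instance

-- ===== CLAIM (what is proved, stated in full; the proofs are below) =====
def Claim_equal_max_y_pos_hits_target : Prop := ∀ (target_area : (Int × Int) × (Int × Int)), Dom_max_y_pos_hits_target target_area → Spec_max_y_pos_hits_target target_area (max_y_pos_hits_target target_area)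

-- ===== LEMMAS AND PROOFS =====
set_option maxRecDepth 40000

-- proof-side closed forms
def T2 (t : Int) : Int := PySem.Int.floordiv (t * (t - 1)) 2
def Ypos (yv t : Int) : Int := t * yv - T2 t
def Xpos (xv t : Int) : Int := if t ≤ xv then t * xv - T2 t else peakB xv
def Vx (xv t : Int) : Int := if t ≤ xv then xv - t else 0

theorem T2_double (t : Int) : 2 * T2 t = t * (t - 1) := by
  obtain ⟨k, hk⟩ : Even (t * (t - 1)) := by
    have := Int.even_mul_succ_self (t - 1)
    simpa [mul_comm] using this
  have hk2 : t * (t - 1) = 2 * k := by omega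
  rw [T2, hk2, PySem.Int.floordiv_eq_ediv_of_pos (by norm_num), Int.mul_ediv_cancel_left k (by norm_num)]

theorem peakB_double (v : Int) : 2 * peakB v = v * (v + 1) := by
  obtain ⟨k, hk⟩ : Even (v * (v + 1)) := Int.even_mul_succ_self v
  have hk2 : v * (v + 1) = 2 * k := by omega
  rw [peakB, hk2, PySem.Int.floordiv_eq_ediv_of_pos (by norm_num), Int.mul_ediv_cancel_left k (by norm_num)]

theorem Ypos_succ (yv t : Int) : Ypos yv (t + 1) = Ypos yv t + (yv - t) := by
  have h1 := T2_double t
  have h2 := T2_double (t + 1)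
  unfold Ypos; nlinarith [h1, h2]

theorem Xpos_succ (xv t : Int) (hxv : 1 ≤ xv) : Xpos xv (t + 1) = Xpos xv t + Vx xv t := by
  have h1 := T2_double t
  have h2 := T2_double (t + 1)
  have hp := peakB_double xv
  unfold Xpos Vx
  by_cases h : t + 1 ≤ xv
  · rw [if_pos h, if_pos (by omega), if_pos (by omega)]; nlinarith
  · by_cases h' : t ≤ xv
    · have ht : t = xv := by omega
      subst ht
      rw [if_neg h, if_pos h', if_pos h']; nlinarith
    · rw [if_neg h, if_neg h', if_neg h']; ring

theorem Vx_succ (xv t : Int) (hxv : 1 ≤ xv) (ht : 0 ≤ t) :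
    (if Vx xv t > 0 then Vx xv t - 1 else if Vx xv t < 0 then Vx xv t + 1 else 0) = Vx xv (t + 1) := by
  unfold Vx
  by_cases h : t + 1 ≤ xv
  · rw [if_pos (by omega), if_pos (by omega : t ≤ xv), if_pos h]; omega
  · by_cases h' : t ≤ xv
    · rw [if_pos h', if_neg h, if_neg (by omega), if_neg (by omega)]
    · rw [if_neg h', if_neg h, if_neg (by omega), if_neg (by omega)]

theorem ascent (yv t : Int) (h1 : 1 ≤ t) (h2 : t ≤ yv) : yv ≤ Ypos yv t := by
  have hd := T2_double t
  unfold Ypos; nlinarith [mul_nonneg (by omega : (0:Int) ≤ t - 1) (by omega : (0:Int) ≤ 2 * yv - t)]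

theorem in_target_iff (x y : Int) (ta : (Int × Int) × (Int × Int)) :
    in_target_area x y ta = decide (ta.1.1 ≤ x ∧ x ≤ ta.1.2 ∧ ta.2.1 ≤ y ∧ y ≤ ta.2.2) := by
  simp only [in_target_area, x_in_range, y_in_range]
  split_ifs <;> simp <;> omega

theorem yir_iff (y : Int) (ta : (Int × Int) × (Int × Int)) :
    (y_in_range y ta == -1) = decide (y < ta.2.1) := by
  simp only [y_in_range]; split_ifs <;> simp <;> omega

theorem xir_iff (x : Int) (ta : (Int × Int) × (Int × Int)) :
    (x_in_range x ta == 1) = decide (ta.1.1 ≤ x ∧ ta.1.2 < x) := by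
  simp only [x_in_range]; split_ifs <;> simp <;> omega

theorem hits_loop_empty_x (ta : (Int × Int) × (Int × Int)) (hemp : ta.1.2 < ta.1.1) :
    ∀ f x y xv yv, hits_loop ta f x y xv yv = false := by
  intro f
  induction f with
  | zero =>
    intro x y xv yv
    rw [hits_loop]
    simp only [in_target_iff, xir_iff, yir_iff]
    split_ifs <;> simp_all <;> omega
  | succ f ih =>
    intro x y xv yv
    rw [hits_loop]
    simp only [in_target_iff, xir_iff, yir_iff]
    split_ifs with h1 h2 h3 <;> simp_all
    omega

theorem hitsB_step (xv yv a b c d : Int) (f : Nat) (t : Int) :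
    hitsB_loop xv yv a b c d f t =
      (if Ypos yv t < c ∧ t > yv then false
       else if a ≤ Xpos xv t ∧ Xpos xv t ≤ b ∧ c ≤ Ypos yv t ∧ Ypos yv t ≤ d then true
       else if Xpos xv t > b then false
       else match f with | 0 => false | f' + 1 => hitsB_loop xv yv a b c d f' (t + 1)) := by
  cases f <;> rfl

theorem loop_eq (ta : (Int × Int) × (Int × Int)) (xv yv : Int) (hxv : 1 ≤ xv) (hyv : 1 ≤ yv)
    (hmy : ta.2.1 ≤ yv) :
    ∀ f t, 1 ≤ t → ta.2.1 ≤ Ypos yv t → Xpos xv t ≤ ta.1.2 →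
      hits_loop ta f (Xpos xv t) (Ypos yv t) (Vx xv t) (yv - t) =
      hitsB_loop xv yv ta.1.1 ta.1.2 ta.2.1 ta.2.2 f t := by
  intro f
  induction f with
  | zero =>
    intro t ht hY hX
    rw [hits_loop, hitsB_step]
    simp only [step, in_target_iff, yir_iff, xir_iff, decide_eq_true_eq]
    have hnb : ¬(Ypos yv t < ta.2.1 ∧ t > yv) := by rintro ⟨h, -⟩; omega
    rw [if_neg hnb]
    by_cases hT : ta.1.1 ≤ Xpos xv t ∧ Xpos xv t ≤ ta.1.2 ∧ ta.2.1 ≤ Ypos yv t ∧ Ypos yv t ≤ ta.2.2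
    · rw [if_pos hT, if_pos hT]
    · rw [if_neg hT, if_neg hT]
      split_ifs <;> rfl
  | succ f ih =>
    intro t ht hY hX
    rw [hits_loop, hitsB_step]
    simp only [step, in_target_iff, yir_iff, xir_iff, decide_eq_true_eq]
    have hnb : ¬(Ypos yv t < ta.2.1 ∧ t > yv) := by rintro ⟨h, -⟩; omega
    rw [if_neg hnb,
        show Ypos yv t + (yv - t) = Ypos yv (t + 1) from (Ypos_succ yv t).symm,
        show Xpos xv t + Vx xv t = Xpos xv (t + 1) from (Xpos_succ xv t hxv).symm,
        Vx_succ xv t hxv (by omega)]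
    by_cases hT : ta.1.1 ≤ Xpos xv t ∧ Xpos xv t ≤ ta.1.2 ∧ ta.2.1 ≤ Ypos yv t ∧ Ypos yv t ≤ ta.2.2
    · rw [if_pos hT, if_pos hT]
    · have hno : ¬ Xpos xv t > ta.1.2 := by omega
      rw [if_neg hT, if_neg hT, if_neg hno,
          show yv - t - 1 = yv - (t + 1) from by ring]
      show _ = hitsB_loop xv yv ta.1.1 ta.1.2 ta.2.1 ta.2.2 f (t + 1)
      by_cases hy1 : Ypos yv (t + 1) < ta.2.1
      · -- A aborts; B's next step y-aborts (t+1 is necessarily past the peak)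
        have htv : t + 1 > yv := by
          by_contra hle
          have := ascent yv (t + 1) (by omega) (by omega)
          omega
        rw [if_pos hy1, hitsB_step,
            if_pos (show Ypos yv (t + 1) < ta.2.1 ∧ t + 1 > yv from ⟨hy1, htv⟩)]
      · have hnb1 : ¬(Ypos yv (t + 1) < ta.2.1 ∧ t + 1 > yv) := by rintro ⟨h, -⟩; omega
        rw [if_neg hy1]
        by_cases hxa : ta.1.1 ≤ Xpos xv (t + 1) ∧ ta.1.2 < Xpos xv (t + 1)
        · -- A x-aborts; B sees the same overshoot one step later
          have hnt1 : ¬(ta.1.1 ≤ Xpos xv (t + 1) ∧ Xpos xv (t + 1) ≤ ta.1.2 ∧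
              ta.2.1 ≤ Ypos yv (t + 1) ∧ Ypos yv (t + 1) ≤ ta.2.2) := by
            rintro ⟨-, h, -⟩; omega
          rw [if_pos hxa, hitsB_step, if_neg hnb1, if_neg hnt1,
              if_pos (show Xpos xv (t + 1) > ta.1.2 by omega)]
        · rw [if_neg hxa]
          by_cases hxo : Xpos xv (t + 1) ≤ ta.1.2
          · exact ih (t + 1) (by omega) (by omega) hxo
          · -- x overshoots while left of x_min: the x-interval is empty, both sides return false
            have hemp : ta.1.2 < ta.1.1 := by omega
            have hnt1 : ¬(ta.1.1 ≤ Xpos xv (t + 1) ∧ Xpos xv (t + 1) ≤ ta.1.2 ∧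
                ta.2.1 ≤ Ypos yv (t + 1) ∧ Ypos yv (t + 1) ≤ ta.2.2) := by
              rintro ⟨-, h, -⟩; omega
            rw [hits_loop_empty_x ta hemp, hitsB_step, if_neg hnb1, if_neg hnt1,
                if_pos (show Xpos xv (t + 1) > ta.1.2 by omega)]

theorem Ypos_one (yv : Int) : Ypos yv 1 = yv := by
  unfold Ypos
  rw [show T2 1 = 0 from rfl]; ring

theorem Xpos_one (xv : Int) (hxv : 1 ≤ xv) : Xpos xv 1 = xv := by
  unfold Xpos
  rw [if_pos hxv, show T2 1 = 0 from rfl]; ring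

theorem Vx_one (xv : Int) (hxv : 1 ≤ xv) : Vx xv 1 = xv - 1 := by
  unfold Vx; rw [if_pos hxv]

theorem hits_eq (ta : (Int × Int) × (Int × Int)) (xv yv : Int) (hxv : 1 ≤ xv) (hyv : 1 ≤ yv) :
    hits_target_area xv yv ta = hitsB xv yv ta.1.1 ta.1.2 ta.2.1 ta.2.2 := by
  rw [hits_target_area, hits_loop, hitsB]
  simp only [step, in_target_iff, yir_iff, xir_iff, decide_eq_true_eq]
  by_cases h0 : ta.1.1 ≤ 0 ∧ 0 ≤ ta.1.2 ∧ ta.2.1 ≤ 0 ∧ 0 ≤ ta.2.2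
  · rw [if_pos h0, if_pos h0]
  · rw [if_neg h0, if_neg h0]
    simp only [zero_add]
    by_cases hy : yv < ta.2.1
    · rw [if_pos hy, if_pos hy]
    · rw [if_neg hy, if_neg hy]
      by_cases hxa : ta.1.1 ≤ xv ∧ ta.1.2 < xv
      · rw [if_pos hxa, hitsB_step, Ypos_one, Xpos_one xv hxv,
            if_neg (by rintro ⟨-, h⟩; omega), if_neg (by rintro ⟨-, h, -⟩; omega),
            if_pos (show xv > ta.1.2 from hxa.2)]
      · rw [if_neg hxa]
        show hits_loop ta (2 * yv.natAbs + ta.2.1.natAbs + 3) xv yv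
            (if xv > 0 then xv - 1 else if xv < 0 then xv + 1 else 0) (yv - 1) = _
        rw [if_pos (show xv > 0 by omega)]
        by_cases hxo : xv ≤ ta.1.2
        · have := loop_eq ta xv yv hxv hyv (by omega) (2 * yv.natAbs + ta.2.1.natAbs + 3) 1
            (by omega) (by rw [Ypos_one]; omega) (by rw [Xpos_one xv hxv]; omega)
          rw [Ypos_one, Xpos_one xv hxv, Vx_one xv hxv] at this
          exact this
        · have hemp : ta.1.2 < ta.1.1 := by omega
          rw [hits_loop_empty_x ta hemp, hitsB_step, Ypos_one, Xpos_one xv hxv,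
              if_neg (by rintro ⟨-, h⟩; omega), if_neg (by rintro ⟨h, -⟩; omega),
              if_pos (show xv > ta.1.2 by omega)]


theorem peakB_rec (v : Int) : peakB v = v + peakB (v - 1) := by
  have h1 := peakB_double v
  have h2 := peakB_double (v - 1)
  nlinarith

theorem peakB_nonneg (v : Int) (hv : 0 ≤ v) : 0 ≤ peakB v := by
  have h := peakB_double v
  nlinarith

theorem peakB_ge_self (v : Int) (hv : 0 ≤ v) : v ≤ peakB v := by
  have h := peakB_double v
  rcases eq_or_lt_of_le hv with h0 | h1
  · subst h0; decide
  · nlinarith [mul_nonneg (by omega : (0:Int) ≤ v - 1) (by omega : (0:Int) ≤ v)]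

theorem max_y_step (f : Nat) (x y xv yv m : Int) :
    max_y_loop f x y xv yv m =
      if yv > 0 then
        (match f with
         | 0 => m
         | f' + 1 => max_y_loop f' (x + xv) (y + yv)
             (if xv > 0 then xv - 1 else if xv < 0 then xv + 1 else 0) (yv - 1) (max m (y + yv)))
      else m := by
  cases f <;> rfl

theorem max_y_loop_eq : ∀ (n f : Nat), n ≤ f → ∀ (x y xv m yv : Int), yv = (n : Int) →
    max_y_loop f x y xv yv m = if 1 ≤ yv then max m (y + peakB yv) else m := by
  intro n
  induction n with
  | zero =>
    intro f _ x y xv m yv hyv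
    subst hyv
    rw [max_y_step, if_neg (by omega), if_neg (by omega)]
  | succ n ih =>
    intro f hnf x y xv m yv hyv
    cases f with
    | zero => omega
    | succ f' =>
      subst hyv
      rw [max_y_step, if_pos (by positivity)]
      show max_y_loop f' (x + xv) (y + ((n : Int) + 1)) _ (((n : Int) + 1) - 1) (max m (y + ((n : Int) + 1))) = _
      rw [ih f' (by omega) (x + xv) (y + ((n : Int) + 1)) _ (max m (y + ((n : Int) + 1)))
            (((n : Int) + 1) - 1) (by push_cast; ring)]
      rcases Nat.eq_zero_or_pos n with hn | hn
      · subst hn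
        rw [if_neg (by norm_num), if_pos (by norm_num)]
        norm_num [show peakB 1 = 1 from rfl]
      · rw [if_pos (by push_cast; omega), if_pos (by push_cast; omega)]
        have hrec : peakB ((n : Int) + 1) = ((n : Int) + 1) + peakB (((n : Int) + 1) - 1) := peakB_rec _
        have hnn : 0 ≤ peakB (((n : Int) + 1) - 1) := peakB_nonneg _ (by push_cast; omega)
        rw [max_assoc]
        congr 1
        rw [max_eq_right (by omega), show ((n + 1 : Nat) : Int) = (n : Int) + 1 from by push_cast; ring, hrec]
        ring

theorem max_y_pos_eq (xv yv : Int) (hyv : 1 ≤ yv) : max_y_pos xv yv = peakB yv := by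
  rw [max_y_pos, max_y_loop_eq yv.natAbs yv.natAbs le_rfl 0 0 xv 0 yv (by omega),
      if_pos hyv, zero_add, max_eq_right (by nlinarith [peakB_ge_self yv (by omega)])]


theorem peakB_lt_iff (a b : Int) (ha : 0 ≤ a) (hb : 0 ≤ b) : peakB a < peakB b ↔ a < b := by
  have h1 := peakB_double a
  have h2 := peakB_double b
  constructor
  · intro h
    by_contra hc
    push_neg at hc
    nlinarith [mul_nonneg (by omega : (0:Int) ≤ a - b) (by omega : (0:Int) ≤ a + b + 1)]
  · intro h
    nlinarith [mul_nonneg (by omega : (0:Int) ≤ b - a - 1) (by omega : (0:Int) ≤ a + b + 1)]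

-- find? over a descending pyRange n..1 returns the greatest element satisfying p
theorem desc_find_some (p : Int → Bool) : ∀ (n : Nat) (m : Int),
    (PySem.List.pyRange (n : Int) 0 (-1)).find? p = some m →
    p m = true ∧ ∀ y : Int, m < y → y ≤ (n : Int) → p y = false := by
  intro n
  induction n with
  | zero =>
    intro m h
    rw [PySem.List.pyRange_neg_one_eq_nil (by norm_num)] at h
    simp at h
  | succ n ih =>
    intro m h
    rw [PySem.List.pyRange_neg_one_cons (by push_cast; omega),
        show ((n + 1 : Nat) : Int) - 1 = (n : Int) from by push_cast; ring,
        List.find?_cons] at h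
    cases hp : p ((n + 1 : Nat) : Int) with
    | true =>
      rw [hp] at h
      simp only [Option.some.injEq] at h
      subst h
      exact ⟨hp, fun y h1 h2 => by omega⟩
    | false =>
      rw [hp] at h
      obtain ⟨hm, hrest⟩ := ih m h
      refine ⟨hm, fun y h1 h2 => ?_⟩
      rcases eq_or_lt_of_le h2 with he | hl
      · rw [he]; exact hp
      · exact hrest y h1 (by push_cast at hl ⊢; omega)

theorem desc_find_eq_some (p : Int → Bool) : ∀ (n : Nat) (m : Int), 1 ≤ m → m ≤ (n : Int) →
    p m = true → (∀ y : Int, m < y → y ≤ (n : Int) → p y = false) →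
    (PySem.List.pyRange (n : Int) 0 (-1)).find? p = some m := by
  intro n
  induction n with
  | zero => intro m h1 h2; omega
  | succ n ih =>
    intro m h1 h2 hp habove
    rw [PySem.List.pyRange_neg_one_cons (by push_cast; omega),
        show ((n + 1 : Nat) : Int) - 1 = (n : Int) from by push_cast; ring,
        List.find?_cons]
    rcases eq_or_lt_of_le h2 with he | hl
    · rw [← he, hp]
    · rw [habove ((n + 1 : Nat) : Int) (by push_cast at hl ⊢; omega) le_rfl]
      exact ih m h1 (by push_cast at hl ⊢; omega) hp
        (fun y hy1 hy2 => habove y hy1 (by push_cast at hy2 ⊢; omega))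

-- find? over an ascending pyRange returns the least element satisfying p
theorem asc_find_some (p : Int → Bool) : ∀ (n : Nat) (a : Int) (m : Int),
    (PySem.List.pyRange a (a + (n : Int)) 1).find? p = some m →
    p m = true ∧ ∀ x : Int, a ≤ x → x < m → p x = false := by
  intro n
  induction n with
  | zero =>
    intro a m h
    rw [PySem.List.pyRange_one_eq_nil (by omega)] at h
    simp at h
  | succ n ih =>
    intro a m h
    rw [PySem.List.pyRange_one_cons (by push_cast; omega), List.find?_cons] at h
    cases hp : p a with
    | true =>
      rw [hp] at h
      simp only [Option.some.injEq] at h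
      subst h
      exact ⟨hp, fun x h1 h2 => by omega⟩
    | false =>
      rw [hp] at h
      rw [show a + ((n + 1 : Nat) : Int) = (a + 1) + (n : Int) from by push_cast; ring] at h
      obtain ⟨hm, hbelow⟩ := ih (a + 1) m h
      refine ⟨hm, fun x h1 h2 => ?_⟩
      rcases eq_or_lt_of_le h1 with he | hl
      · rw [← he]; exact hp
      · exact hbelow x (by omega) h2


def Hit (ta : (Int × Int) × (Int × Int)) (xv yv : Int) : Bool :=
  hitsB xv yv ta.1.1 ta.1.2 ta.2.1 ta.2.2

def colMax? (ta : (Int × Int) × (Int × Int)) (xv : Int) : Option Int :=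
  (PySem.List.pyRange 499 0 (-1)).find? (fun yv => Hit ta xv yv)

def thr : Option (Int × Int) → Int
  | none => 0
  | some (_, b) => b

def gam : Option (Int × Int) → Int × Option Int × Option Int
  | none => (0, none, none)
  | some (a, b) => (peakB b, some a, some b)

def colupd (ta : (Int × Int) × (Int × Int)) (xv : Int) (c : Option (Int × Int)) (yv : Int) :
    Option (Int × Int) :=
  if Hit ta xv yv ∧ peakB yv > peakB (thr c) then some (xv, yv) else c

def dstep (ta : (Int × Int) × (Int × Int)) (c : Option (Int × Int)) (xv : Int) :
    Option (Int × Int) :=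
  match colMax? ta xv with
  | some m => if m > thr c then some (xv, m) else c
  | none => c

theorem gam_fst (c : Option (Int × Int)) : (gam c).1 = peakB (thr c) := by
  rcases c with _ | ⟨a, b⟩ <;> rfl

theorem gam_fold_inner (ta : (Int × Int) × (Int × Int)) (xv : Int) :
    ∀ (ys : List Int) (c : Option (Int × Int)),
      ys.foldl (fun st yv =>
        if Hit ta xv yv then
          (if peakB yv > st.1 then (peakB yv, some xv, some yv) else st)
        else st) (gam c) =
      gam (ys.foldl (colupd ta xv) c) := by
  intro ys
  induction ys with
  | nil => intro c; rfl
  | cons yv ys ih =>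
    intro c
    simp only [List.foldl_cons]
    have hstep : (if Hit ta xv yv then
        (if peakB yv > (gam c).1 then (peakB yv, some xv, some yv) else gam c)
      else gam c) = gam (colupd ta xv c yv) := by
      rw [gam_fst, colupd]
      by_cases hH : Hit ta xv yv
      · simp only [hH, if_true, true_and]
        by_cases hgt : peakB yv > peakB (thr c)
        · rw [if_pos hgt, if_pos hgt]; rfl
        · rw [if_neg hgt, if_neg hgt]
      · simp only [hH, Bool.false_eq_true, if_false, false_and]
    rw [hstep, ih]


theorem col_fold (ta : (Int × Int) × (Int × Int)) (xv : Int) :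
    ∀ (n : Nat) (c : Option (Int × Int)), 0 ≤ thr c →
      (PySem.List.pyRange 1 ((n : Int) + 1) 1).foldl (colupd ta xv) c =
      (match (PySem.List.pyRange (n : Int) 0 (-1)).find? (fun yv => Hit ta xv yv) with
       | some m => if m > thr c then some (xv, m) else c
       | none => c) := by
  intro n
  induction n with
  | zero =>
    intro c hc
    rw [PySem.List.pyRange_one_eq_nil (by norm_num),
        PySem.List.pyRange_neg_one_eq_nil (by norm_num)]
    rfl
  | succ n ih =>
    intro c hc
    push_cast
    rw [PySem.List.pyRange_one_succ_right (show (1:Int) ≤ (n : Int) + 1 by omega),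
        List.foldl_append, ih c hc,
        PySem.List.pyRange_neg_one_cons (a := (n : Int) + 1) (b := 0) (by omega),
        show (n : Int) + 1 - 1 = (n : Int) from by ring]
    simp only [List.foldl_cons, List.foldl_nil]
    have hpk : (peakB ((n : Int) + 1) > peakB (thr c)) = ((n : Int) + 1 > thr c) := by
      apply propext
      rw [gt_iff_lt, gt_iff_lt, peakB_lt_iff _ _ hc (by omega)]
    cases hH : Hit ta xv ((n : Int) + 1) with
    | true =>
      rw [List.find?_cons_of_pos hH]
      cases hf : (PySem.List.pyRange (n : Int) 0 (-1)).find? (fun yv => Hit ta xv yv) with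
      | none =>
        simp only [colupd, hH, true_and, hpk]
      | some m =>
        have hmb : 0 < m ∧ m ≤ (n : Int) := by
          have := List.mem_of_find?_eq_some hf
          rw [PySem.List.mem_pyRange_neg_one] at this
          exact this
        simp only []
        by_cases hm : m > thr c
        · rw [if_pos hm]
          rw [colupd, hH]
          simp only [true_and]
          rw [show thr (some (xv, m)) = m from rfl]
          rw [if_pos (by rw [gt_iff_lt, peakB_lt_iff _ _ (by omega) (by omega)]; omega),
              if_pos (by omega)]
        · rw [if_neg hm]
          rw [colupd, hH]
          simp only [true_and, hpk]
    | false =>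
      rw [List.find?_cons_of_neg (by rw [hH]; exact Bool.false_ne_true)]
      have hcu : ∀ c' : Option (Int × Int), colupd ta xv c' ((n : Int) + 1) = c' := by
        intro c'
        rw [colupd, if_neg (by rintro ⟨h, -⟩; rw [hH] at h; exact Bool.false_ne_true h)]
      cases hf : (PySem.List.pyRange (n : Int) 0 (-1)).find? (fun yv => Hit ta xv yv) with
      | none => simp only [hcu]
      | some m => simp only [hcu]


def rowFind (ta : (Int × Int) × (Int × Int)) (yv : Int) : Option Int :=
  (PySem.List.pyRange 1 241 1).find? (fun xv => Hit ta xv yv)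

def hasHit (ta : (Int × Int) × (Int × Int)) (yv : Int) : Bool := (rowFind ta yv).isSome

theorem searchB_eq (ta : (Int × Int) × (Int × Int)) : ∀ (l : List Int),
    searchB ta.1.1 ta.1.2 ta.2.1 ta.2.2 l =
      match l.find? (fun yv => hasHit ta yv) with
      | none => (0, none, none)
      | some yv =>
        match rowFind ta yv with
        | some xv => (peakB yv, some xv, some yv)
        | none => (0, none, none) := by
  intro l
  induction l with
  | nil => rfl
  | cons yv rest ih =>
    rw [searchB]
    have hrw : (PySem.List.pyRange 1 241 1).find?
        (fun xv => hitsB xv yv ta.1.1 ta.1.2 ta.2.1 ta.2.2) = rowFind ta yv := rfl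
    rw [hrw]
    cases hr : rowFind ta yv with
    | some xv =>
      rw [List.find?_cons_of_pos (by rw [hasHit, hr]; rfl)]
      simp only [hr]
    | none =>
      rw [List.find?_cons_of_neg (by rw [hasHit, hr]; exact Bool.false_ne_true)]
      exact ih

theorem thr_dstep_nonneg (ta : (Int × Int) × (Int × Int)) (c : Option (Int × Int)) (xv : Int)
    (hc : 0 ≤ thr c) : 0 ≤ thr (dstep ta c xv) := by
  rw [dstep]
  cases hm : colMax? ta xv with
  | none => exact hc
  | some m =>
    have hmem := List.mem_of_find?_eq_some hm
    rw [PySem.List.mem_pyRange_neg_one] at hmem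
    show 0 ≤ thr (if m > thr c then some (xv, m) else c)
    by_cases h : m > thr c
    · rw [if_pos h]; show (0:Int) ≤ m; omega
    · rw [if_neg h]; exact hc

theorem fold_cols (ta : (Int × Int) × (Int × Int)) : ∀ (xs : List Int) (c : Option (Int × Int)),
    0 ≤ thr c →
    xs.foldl (fun c xv => (PySem.List.pyRange 1 500 1).foldl (colupd ta xv) c) c =
    xs.foldl (dstep ta) c := by
  intro xs
  induction xs with
  | nil => intro c _; rfl
  | cons xv rest ih =>
    intro c hc
    simp only [List.foldl_cons]
    have h500 : (500 : Int) = ((499 : Nat) : Int) + 1 := by norm_num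
    have hcol : (PySem.List.pyRange 1 500 1).foldl (colupd ta xv) c = dstep ta c xv := by
      rw [h500, col_fold ta xv 499 c hc, dstep]
      norm_num [colMax?]
    rw [hcol]
    exact ih (dstep ta c xv) (thr_dstep_nonneg ta c xv hc)


theorem colMax_none_of_nohit (ta : (Int × Int) × (Int × Int))
    (hnone : (PySem.List.pyRange 499 0 (-1)).find? (fun yv => hasHit ta yv) = none)
    (xv : Int) (hx1 : 1 ≤ xv) (hx2 : xv ≤ 240) : colMax? ta xv = none := by
  rw [colMax?, List.find?_eq_none]
  intro yv hyv hH
  have hhh : hasHit ta yv = true := by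
    rw [hasHit, rowFind]
    exact List.find?_isSome.2 ⟨xv, by rw [PySem.List.mem_pyRange_one]; omega, hH⟩
  exact absurd hhh (by simpa using (List.find?_eq_none.1 hnone) yv hyv)

theorem fold_dstep_keep (ta : (Int × Int) × (Int × Int)) :
    ∀ (xs : List Int) (c : Option (Int × Int)), (∀ x ∈ xs, colMax? ta x = none) →
      xs.foldl (dstep ta) c = c := by
  intro xs
  induction xs with
  | nil => intro c _; rfl
  | cons x rest ih =>
    intro c hall
    simp only [List.foldl_cons]
    have hd : dstep ta c x = c := by
      rw [dstep, hall x (by simp)]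
    rw [hd]
    exact ih c (fun x hx => hall x (by simp [hx]))


theorem cast499 : ((499 : Nat) : Int) = (499 : Int) := by norm_num
theorem cast240 : ((240 : Nat) : Int) = (240 : Int) := by norm_num

-- facts about the found best row Y* and its least hitting column X*
theorem hit_facts (ta : (Int × Int) × (Int × Int)) (Y X0 : Int)
    (hfy : (PySem.List.pyRange 499 0 (-1)).find? (fun yv => hasHit ta yv) = some Y)
    (hrow : rowFind ta Y = some X0) :
    (1 ≤ Y ∧ Y ≤ 499) ∧ (1 ≤ X0 ∧ X0 ≤ 240) ∧ Hit ta X0 Y = true ∧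
    (∀ xv m, 1 ≤ xv → xv ≤ 240 → colMax? ta xv = some m → m ≤ Y) ∧
    (∀ xv m, 1 ≤ xv → xv < X0 → colMax? ta xv = some m → m < Y) ∧
    colMax? ta X0 = some Y := by
  have hYmem := List.mem_of_find?_eq_some hfy
  rw [PySem.List.mem_pyRange_neg_one] at hYmem
  have hXmem := List.mem_of_find?_eq_some hrow
  rw [PySem.List.mem_pyRange_one] at hXmem
  have hrow2 : (PySem.List.pyRange 1 241 1).find? (fun xv => Hit ta xv Y) = some X0 := hrow
  have hXY : Hit ta X0 Y = true := by simpa using List.find?_some hrow2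
  have habove : ∀ y : Int, Y < y → y ≤ 499 → hasHit ta y = false := by
    intro y h1 h2
    have := (desc_find_some (fun yv => hasHit ta yv) 499 Y (by rw [cast499]; exact hfy)).2
    exact this y h1 (by rw [cast499]; exact h2)
  have hnothit : ∀ xv y, 1 ≤ xv → xv ≤ 240 → Y < y → y ≤ 499 → Hit ta xv y = false := by
    intro xv y hx1 hx2 h1 h2
    by_contra hc
    have hh : Hit ta xv y = true := by
      cases hb : Hit ta xv y
      · exact absurd hb hc
      · rfl
    have : hasHit ta y = true := by
      rw [hasHit, rowFind]
      exact List.find?_isSome.2 ⟨xv, by rw [PySem.List.mem_pyRange_one]; omega, hh⟩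
    rw [habove y h1 h2] at this
    exact Bool.false_ne_true this
  have hF1 : ∀ xv m, 1 ≤ xv → xv ≤ 240 → colMax? ta xv = some m → m ≤ Y := by
    intro xv m hx1 hx2 hcm
    have hmmem := List.mem_of_find?_eq_some hcm
    rw [PySem.List.mem_pyRange_neg_one] at hmmem
    have hHm : Hit ta xv m = true := List.find?_some hcm
    by_contra hgt
    rw [hnothit xv m hx1 hx2 (by omega) (by omega)] at hHm
    exact Bool.false_ne_true hHm
  have hleft : ∀ x : Int, 1 ≤ x → x < X0 → Hit ta x Y = false := by
    intro x h1 h2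
    have h241 : (241 : Int) = 1 + ((240 : Nat) : Int) := by norm_num
    have := (asc_find_some (fun xv => Hit ta xv Y) 240 1 X0 (by rw [← h241]; exact hrow2)).2
    exact this x h1 h2
  refine ⟨⟨by omega, by omega⟩, ⟨by omega, by omega⟩, hXY, hF1, ?_, ?_⟩
  · intro xv m hx1 hx2 hcm
    have hle := hF1 xv m hx1 (by omega) hcm
    rcases eq_or_lt_of_le hle with he | hl
    · exfalso
      have hHm : Hit ta xv m = true := List.find?_some hcm
      rw [he, hleft xv hx1 hx2] at hHm
      exact Bool.false_ne_true hHm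
    · exact hl
  · have : (PySem.List.pyRange ((499 : Nat) : Int) 0 (-1)).find? (fun yv => Hit ta X0 yv) = some Y := by
      apply desc_find_eq_some (fun yv => Hit ta X0 yv) 499 Y (by omega) (by rw [cast499]; omega) hXY
      intro y h1 h2
      exact hnothit X0 y (by omega) (by omega) h1 (by rw [cast499] at h2; exact h2)
    rw [colMax?, ← cast499]
    exact this


theorem fold_dstep_hit (ta : (Int × Int) × (Int × Int)) (Y X0 : Int)
    (hfy : (PySem.List.pyRange 499 0 (-1)).find? (fun yv => hasHit ta yv) = some Y)
    (hrow : rowFind ta Y = some X0) :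
    (PySem.List.pyRange 1 241 1).foldl (dstep ta) none = some (X0, Y) := by
  obtain ⟨hYb, hXb, hXY, hF1, hF2, hF3⟩ := hit_facts ta Y X0 hfy hrow
  have main : ∀ (k : Nat), (k : Int) ≤ 240 →
      (if (k : Int) < X0 then
        ((PySem.List.pyRange 1 ((k : Int) + 1) 1).foldl (dstep ta) none = none ∨
         ∃ p q, (PySem.List.pyRange 1 ((k : Int) + 1) 1).foldl (dstep ta) none = some (p, q) ∧
           1 ≤ q ∧ q < Y)
       else (PySem.List.pyRange 1 ((k : Int) + 1) 1).foldl (dstep ta) none = some (X0, Y)) := by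
    intro k
    induction k with
    | zero =>
      intro _
      rw [if_pos (by push_cast; omega)]
      left
      rw [show ((0 : Nat) : Int) + 1 = 1 from by norm_num,
          PySem.List.pyRange_one_eq_nil (by norm_num)]
      rfl
    | succ k ih =>
      intro hk240
      have hk' : (k : Int) ≤ 240 := by push_cast at hk240 ⊢; omega
      have ihs := ih hk'
      push_cast
      rw [PySem.List.pyRange_one_succ_right (by omega : (1:Int) ≤ (k : Int) + 1),
          List.foldl_append]
      simp only [List.foldl_cons, List.foldl_nil]
      set c := (PySem.List.pyRange 1 ((k : Int) + 1) 1).foldl (dstep ta) none with hc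
      rcases lt_trichotomy ((k : Int) + 1) X0 with hlt | heq | hgt
      · -- still left of X0
        rw [if_pos hlt]
        rw [if_pos (by omega)] at ihs
        have hbound : ∀ m, colMax? ta ((k : Int) + 1) = some m → 1 ≤ m ∧ m < Y :=
          fun m hm => ⟨by
            have := List.mem_of_find?_eq_some hm
            rw [PySem.List.mem_pyRange_neg_one] at this
            omega,
            hF2 ((k : Int) + 1) m (by omega) (by omega) hm⟩
        rcases ihs with hnone | ⟨p, q, hsome, hq1, hq2⟩
        · rw [dstep, hnone]
          cases hm : colMax? ta ((k : Int) + 1) with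
          | none => left; rfl
          | some m =>
            obtain ⟨hm1, hm2⟩ := hbound m hm
            right
            refine ⟨(k : Int) + 1, m, ?_, hm1, hm2⟩
            show (if m > thr none then some ((k : Int) + 1, m) else none) = _
            rw [if_pos (by show m > 0; omega)]
        · rw [dstep, hsome]
          cases hm : colMax? ta ((k : Int) + 1) with
          | none => right; exact ⟨p, q, rfl, hq1, hq2⟩
          | some m =>
            obtain ⟨hm1, hm2⟩ := hbound m hm
            right
            by_cases hmq : m > q
            · refine ⟨(k : Int) + 1, m, ?_, hm1, hm2⟩
              show (if m > thr (some (p, q)) then some ((k : Int) + 1, m) else some (p, q)) = _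
              rw [if_pos (show m > thr (some (p, q)) from hmq)]
            · refine ⟨p, q, ?_, hq1, hq2⟩
              show (if m > thr (some (p, q)) then some ((k : Int) + 1, m) else some (p, q)) = _
              rw [if_neg (show ¬ m > thr (some (p, q)) from hmq)]
      · -- this column is X0: it installs (X0, Y)
        rw [if_neg (by omega)]
        rw [if_pos (by omega)] at ihs
        rw [heq, dstep, hF3]
        rcases ihs with hnone | ⟨p, q, hsome, hq1, hq2⟩
        · rw [hnone]
          show (if Y > thr none then some (X0, Y) else none) = _
          rw [if_pos (by show Y > 0; omega)]
        · rw [hsome]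
          show (if Y > thr (some (p, q)) then some (X0, Y) else some (p, q)) = _
          rw [if_pos (by show Y > q; omega)]
      · -- past X0: nothing can displace (X0, Y)
        rw [if_neg (by omega)]
        rw [if_neg (by omega)] at ihs
        rw [dstep, ihs]
        cases hm : colMax? ta ((k : Int) + 1) with
        | none => rfl
        | some m =>
          have hmY := hF1 ((k : Int) + 1) m (by omega) (by omega) hm
          show (if m > thr (some (X0, Y)) then some ((k : Int) + 1, m) else some (X0, Y)) = _
          rw [if_neg (by show ¬ m > Y; omega)]
  have h240 := main 240 (by norm_num)
  rw [if_neg (by rw [cast240]; omega)] at h240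
  rw [show (241 : Int) = ((240 : Nat) : Int) + 1 from by norm_num]
  exact h240


theorem gam_fold_outer (ta : (Int × Int) × (Int × Int)) :
    ∀ (xs : List Int) (c : Option (Int × Int)),
      xs.foldl (fun st xv => (PySem.List.pyRange 1 500 1).foldl (fun st yv =>
        if Hit ta xv yv then
          (if peakB yv > st.1 then (peakB yv, some xv, some yv) else st)
        else st) st) (gam c) =
      gam (xs.foldl (fun c xv => (PySem.List.pyRange 1 500 1).foldl (colupd ta xv) c) c) := by
  intro xs
  induction xs with
  | nil => intro c; rfl
  | cons xv rest ih =>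
    intro c
    simp only [List.foldl_cons]
    rw [gam_fold_inner ta xv _ c, ih]

theorem max_y_pos_hits_target_main (target_area : (Int × Int) × (Int × Int)) :
    max_y_pos_hits_target target_area = max_y_pos_hits_target_alt target_area := by
  rw [max_y_pos_hits_target]
  have hcongr : (PySem.List.pyRange 1 241 1).foldl (fun st x_vel =>
      (PySem.List.pyRange 1 500 1).foldl (fun st y_vel =>
        if hits_target_area x_vel y_vel target_area then
          let new_max := max_y_pos x_vel y_vel
          if new_max > st.1 then (new_max, some x_vel, some y_vel) else st
        else st) st) ((0 : Int), (none : Option Int), (none : Option Int)) =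
      (PySem.List.pyRange 1 241 1).foldl (fun st xv =>
      (PySem.List.pyRange 1 500 1).foldl (fun st yv =>
        if Hit target_area xv yv then
          (if peakB yv > st.1 then (peakB yv, some xv, some yv) else st)
        else st) st) ((0 : Int), (none : Option Int), (none : Option Int)) := by
    apply PySem.List.foldl_congr_mem
    intro acc xv hxv
    rw [PySem.List.mem_pyRange_one] at hxv
    apply PySem.List.foldl_congr_mem
    intro acc2 yv hyv
    rw [PySem.List.mem_pyRange_one] at hyv
    rw [hits_eq target_area xv yv (by omega) (by omega)]
    show (if Hit target_area xv yv then
        let new_max := max_y_pos xv yv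
        if new_max > acc2.1 then (new_max, some xv, some yv) else acc2
      else acc2) = _
    by_cases hH : Hit target_area xv yv
    · simp only [hH, if_true]
      rw [show max_y_pos xv yv = peakB yv from max_y_pos_eq xv yv (by omega)]
    · simp only [hH, Bool.false_eq_true, if_false]
  rw [hcongr]
  rw [show ((0 : Int), (none : Option Int), (none : Option Int)) = gam none from rfl,
      gam_fold_outer target_area _ none,
      fold_cols target_area _ none (by show (0:Int) ≤ 0; omega)]
  rw [show max_y_pos_hits_target_alt target_area =
        searchB target_area.1.1 target_area.1.2 target_area.2.1 target_area.2.2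
          (PySem.List.pyRange 499 0 (-1)) from rfl,
      searchB_eq target_area]
  cases hfy : (PySem.List.pyRange 499 0 (-1)).find? (fun yv => hasHit target_area yv) with
  | none =>
    rw [fold_dstep_keep target_area _ none (fun x hx => by
      rw [PySem.List.mem_pyRange_one] at hx
      exact colMax_none_of_nohit target_area hfy x (by omega) (by omega))]
    rfl
  | some Y =>
    have hsome : (rowFind target_area Y).isSome = true := by
      have := List.find?_some hfy
      simpa [hasHit] using this
    cases hrow : rowFind target_area Y with
    | none => rw [hrow] at hsome; exact absurd hsome (by simp)
    | some X0 =>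
      rw [fold_dstep_hit target_area Y X0 hfy hrow]
      show gam (some (X0, Y)) = (match rowFind target_area Y with
        | some xv => (peakB Y, some xv, some Y)
        | none => ((0 : Int), (none : Option Int), (none : Option Int)))
      rw [hrow]
      rfl


-- ===== VERDICT (by name: the statement is the Claim_ definition above) =====
theorem max_y_pos_hits_target_spec : Claim_equal_max_y_pos_hits_target := by
  intro ta _
  show _ = _
  exact max_y_pos_hits_target_main ta
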